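-- pv_equiv track=rewrite | github.com/L4stIdi0t/arr-tools | src/backend/utils/process_filter.py | _evaluate_string_condition
-- ===== SOURCE A (Python) =====
-- def _evaluate_string_condition(value: str, condition: str) -> bool:
--     condition = condition.casefold().strip()
--     value = value.casefold().strip()
--
--     def parse_condition(condition: str) -> bool:
--         if '&&' in condition:
--             parts = condition.split('&&')
--             return all(parse_condition(part) for part in parts)
--         elif '||' in condition:
--             parts = condition.split('||')
--             return any(parse_condition(part) for part in parts)
--         elif '!' in condition:
--             part = condition[1:]
--             return part not in value
--         else:
--             return condition in value
--
--     return parse_condition(condition)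
-- ===== SOURCE B (Python) =====
-- def _evaluate_string_condition(value: str, condition: str) -> bool:
--     condition = condition.casefold().strip()
--     value = value.casefold().strip()
--     return all(
--         any((d[1:] not in value) if '!' in d else (d in value)
--             for d in conj.split('||'))
--         for conj in condition.split('&&')
--     )
-- ===== Notes on version B (the rewrite author's own statement) =====
-- stated objective: simpler
-- what changed: Replaces the recursive parse_condition helper with a single expression: split on '&&' into conjuncts, split each conjunct on '||' into disjuncts, and evaluate each disjunct as a leaf substring test, combined with all/any; this works because splitting removes every occurrence of the separator, so the recursion never nests beyond two levels.
import Mathlib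
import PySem

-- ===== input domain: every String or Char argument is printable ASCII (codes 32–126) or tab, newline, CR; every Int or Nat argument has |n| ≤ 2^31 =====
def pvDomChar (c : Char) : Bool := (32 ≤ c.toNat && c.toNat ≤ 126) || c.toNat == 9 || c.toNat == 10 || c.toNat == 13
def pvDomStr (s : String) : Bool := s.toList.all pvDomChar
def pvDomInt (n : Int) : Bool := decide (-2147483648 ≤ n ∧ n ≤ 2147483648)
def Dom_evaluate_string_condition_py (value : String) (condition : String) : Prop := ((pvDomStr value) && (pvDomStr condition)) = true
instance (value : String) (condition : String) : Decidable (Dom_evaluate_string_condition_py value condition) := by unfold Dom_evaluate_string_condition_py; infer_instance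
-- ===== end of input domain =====

-- B replaces A's recursive parse_condition with one all/any expression over the '&&' and '||' splits (objective: simpler).


-- ===== PORT A =====
-- splitOn facts needed by the port's termination proof (cited in decreasing_by); first,
-- unfolding equations for PySem.Chars.splitOn.go.
theorem pv_go_zero (sep l cur : List Char) (acc : List (List Char)) :
    PySem.Chars.splitOn.go sep 0 l cur acc = ((cur.reverse ++ l) :: acc).reverse := by
  rw [PySem.Chars.splitOn.go]

theorem pv_go_nil (sep : List Char) (fuel : Nat) (cur : List Char) (acc : List (List Char)) :
    PySem.Chars.splitOn.go sep (fuel+1) [] cur acc = (cur.reverse :: acc).reverse := by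
  rw [PySem.Chars.splitOn.go]; omega

theorem pv_go_cons (sep : List Char) (fuel : Nat) (c : Char) (rest cur : List Char) (acc : List (List Char)) :
    PySem.Chars.splitOn.go sep (fuel+1) (c :: rest) cur acc =
      if sep.isPrefixOf (c :: rest) then
        PySem.Chars.splitOn.go sep fuel (List.drop sep.length (c :: rest)) [] (cur.reverse :: acc)
      else PySem.Chars.splitOn.go sep fuel rest (c :: cur) acc := by
  rw [PySem.Chars.splitOn.go]

-- Every part produced by Python's str.split(sep) is a contiguous substring of the source.
theorem pv_go_mem_infix (sep : List Char) (fuel : Nat) :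
    ∀ (l cur : List Char) (acc : List (List Char)) (p : List Char),
      p ∈ PySem.Chars.splitOn.go sep fuel l cur acc → p ∈ acc ∨ p <:+: (cur.reverse ++ l) := by
  induction fuel with
  | zero =>
    intro l cur acc p hp
    rw [pv_go_zero] at hp
    simp at hp
    rcases hp with h | h
    · exact Or.inl h
    · exact Or.inr (h ▸ List.infix_refl _)
  | succ fuel ih =>
    intro l cur acc p hp
    cases l with
    | nil =>
      rw [pv_go_nil] at hp
      simp at hp
      rcases hp with h | h
      · exact Or.inl h
      · exact Or.inr (h ▸ (List.prefix_append _ _).isInfix)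
    | cons c rest =>
      rw [pv_go_cons] at hp
      by_cases hpre : sep.isPrefixOf (c :: rest) = true
      · simp only [hpre, if_true] at hp
        rcases ih _ _ _ _ hp with h | h
        · simp at h
          rcases h with h | h
          · exact Or.inr (h ▸ (List.prefix_append _ _).isInfix)
          · exact Or.inl h
        · refine Or.inr (h.trans ?_)
          simp only [List.reverse_nil, List.nil_append]
          exact ((List.drop_suffix _ _).trans (List.suffix_append _ _)).isInfix
      · simp only [hpre, Bool.false_eq_true, if_false] at hp
        rcases ih _ _ _ _ hp with h | h
        · exact Or.inl h
        · exact Or.inr (by simpa using h)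

theorem pv_mem_splitOn_infix (s sep p : List Char) (hp : p ∈ PySem.Chars.splitOn s sep) : p <:+: s := by
  have := pv_go_mem_infix sep (s.length + 1) s [] [] p hp
  simpa using this

-- No part produced by str.split(sep) contains sep as a substring.
theorem pv_go_no_sep (sep : List Char) (hsep : sep ≠ []) (fuel : Nat) :
    ∀ (l cur : List Char) (acc : List (List Char)) (p : List Char),
      l.length < fuel →
      (∀ q ∈ acc, ¬ sep <:+: q) →
      (∀ j < cur.length, ¬ sep <+: (cur.reverse ++ l).drop j) →
      p ∈ PySem.Chars.splitOn.go sep fuel l cur acc → ¬ sep <:+: p := by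
  induction fuel with
  | zero => intro l cur acc p hlt; omega
  | succ fuel ih =>
    intro l cur acc p hlt hacc hcur hp
    have hcurrev : ¬ sep <:+: cur.reverse := by
      intro hinf
      obtain ⟨j, hj⟩ := (PySem.Chars.exists_prefix_drop_iff_isIn sep cur.reverse).mpr
        ((PySem.Chars.isIn_iff_infix sep cur.reverse).mpr hinf)
      have hjlt : j < cur.length := by
        by_contra hge
        have : (cur.reverse).drop j = [] := by
          apply List.drop_eq_nil_of_le; simp; omega
        rw [this] at hj
        exact hsep (List.prefix_nil.mp hj)
      exact hcur j hjlt (by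
        rw [List.drop_append_of_le_length (by simp; omega)]
        exact hj.trans (List.prefix_append _ _))
    cases l with
    | nil =>
      rw [pv_go_nil] at hp
      simp at hp
      rcases hp with h | h
      · exact hacc p h
      · exact h ▸ hcurrev
    | cons c rest =>
      rw [pv_go_cons] at hp
      by_cases hpre : sep.isPrefixOf (c :: rest) = true
      · simp only [hpre, if_true] at hp
        refine ih _ _ _ _ ?_ ?_ (by simp) hp
        · have := List.IsPrefix.length_le (List.isPrefixOf_iff_prefix.mp hpre)
          have hs : 0 < sep.length := List.length_pos_iff.mpr hsep
          simp at hlt ⊢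
          omega
        · intro q hq
          simp at hq
          rcases hq with h | h
          · exact h ▸ hcurrev
          · exact hacc q h
      · simp only [hpre, Bool.false_eq_true, if_false] at hp
        refine ih _ _ _ _ (by simp at hlt ⊢; omega) hacc ?_ hp
        intro j hj
        have heq : (c :: cur).reverse ++ rest = cur.reverse ++ (c :: rest) := by simp
        rw [heq]
        simp at hj
        rcases Nat.lt_or_ge j cur.length with hlt' | hge
        · exact hcur j hlt'
        · have hje : j = cur.length := by omega
          subst hje
          rw [List.drop_append_of_le_length (by simp)]
          have hdrop : List.drop cur.length cur.reverse = [] :=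
            List.drop_eq_nil_of_le (by simp)
          rw [hdrop, List.nil_append]
          intro hcon
          exact hpre (List.isPrefixOf_iff_prefix.mpr hcon)

theorem pv_mem_splitOn_not_sep (s sep p : List Char) (hsep : sep ≠ [])
    (hp : p ∈ PySem.Chars.splitOn s sep) : ¬ sep <:+: p := by
  refine pv_go_no_sep sep hsep (s.length + 1) s [] [] p (by omega) (by simp) (by simp) hp

-- Strict length decrease: a part of s.split(sep) is shorter than s when sep occurs in s.
theorem pv_mem_splitOn_length_lt (s sep p : List Char) (hsep : sep ≠ [])
    (hin : PySem.Chars.isIn sep s = true) (hp : p ∈ PySem.Chars.splitOn s sep) :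
    p.length < s.length := by
  have hinf := pv_mem_splitOn_infix s sep p hp
  have hns := pv_mem_splitOn_not_sep s sep p hsep hp
  have hle := hinf.length_le
  rcases Nat.lt_or_ge p.length s.length with h | h
  · exact h
  · exfalso
    have : p = s := hinf.sublist.eq_of_length (by omega)
    exact hns (this ▸ (PySem.Chars.isIn_iff_infix sep s).mp hin)

-- literal port of A's recursive parse_condition (value and condition already casefolded+stripped)
def pvParseCondition (value : List Char) (cond : List Char) : Bool :=
  if h1 : PySem.Chars.isIn ['&','&'] cond = true then
    (PySem.Chars.splitOn cond ['&','&']).attach.all (fun p => pvParseCondition value p.1)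
  else if PySem.Chars.isIn ['|','|'] cond = true then
    (PySem.Chars.splitOn cond ['|','|']).attach.any (fun p => pvParseCondition value p.1)
  else if PySem.Chars.isIn ['!'] cond = true then
    !(PySem.Chars.isIn (PySem.Chars.slice cond (some 1) none) value)
  else
    PySem.Chars.isIn cond value
termination_by cond.length
decreasing_by
  · exact pv_mem_splitOn_length_lt cond ['&','&'] p.1 (by simp) h1 p.2
  · rename_i h2
    exact pv_mem_splitOn_length_lt cond ['|','|'] p.1 (by simp) h2 p.2

-- port of A: casefold (= lower on the printable-ASCII domain) + strip, then the recursive parser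
def evaluate_string_condition_py (value : String) (condition : String) : Bool :=
  pvParseCondition (PySem.Chars.strip (PySem.Chars.lower value.toList))
    (PySem.Chars.strip (PySem.Chars.lower condition.toList))

-- ===== PORT B =====
def pvLeaf (value : List Char) (d : List Char) : Bool :=
  if PySem.Chars.isIn ['!'] d then !(PySem.Chars.isIn (d.drop 1) value)
  else PySem.Chars.isIn d value

-- port of B: two-level all/any over the '&&' and '||' splits
def evaluate_string_condition_py_alt (value : String) (condition : String) : Bool :=
  let v := PySem.Chars.strip (PySem.Chars.lower value.toList)
  let c := PySem.Chars.strip (PySem.Chars.lower condition.toList)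
  (PySem.Chars.splitOn c ['&','&']).all fun cj =>
    (PySem.Chars.splitOn cj ['|','|']).any fun d => pvLeaf v d

-- ===== PRECONDITION & SPEC =====
def Spec_evaluate_string_condition_py (value : String) (condition : String) (out : Bool) : Prop := out = evaluate_string_condition_py_alt value condition
instance (value : String) (condition : String) (out : Bool) : Decidable (Spec_evaluate_string_condition_py value condition out) := by unfold Spec_evaluate_string_condition_py; infer_instance

-- ===== CLAIM =====
def Claim_equal_evaluate_string_condition_py : Prop := ∀ (value : String) (condition : String), Dom_evaluate_string_condition_py value condition → Spec_evaluate_string_condition_py value condition (evaluate_string_condition_py value condition)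

-- ===== LEMMAS AND PROOFS =====
theorem pv_go_no_split (sep : List Char) (fuel : Nat) :
    ∀ (l cur : List Char) (acc : List (List Char)),
      l.length < fuel →
      (∀ j, ¬ sep <+: l.drop j) →
      PySem.Chars.splitOn.go sep fuel l cur acc = ((cur.reverse ++ l) :: acc).reverse := by
  induction fuel with
  | zero => intro l cur acc h; omega
  | succ fuel ih =>
    intro l cur acc hlt hno
    cases l with
    | nil => rw [pv_go_nil]; simp
    | cons c rest =>
      rw [pv_go_cons]
      have hpre : sep.isPrefixOf (c :: rest) = false := by
        by_contra h
        exact hno 0 (List.isPrefixOf_iff_prefix.mp (by simpa using h))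
      simp only [hpre, Bool.false_eq_true, if_false]
      rw [ih rest (c :: cur) acc (by simp at hlt ⊢; omega) (fun j => by simpa using hno (j+1))]
      simp

theorem pv_splitOn_of_not_isIn (s sep : List Char) (_hsep : sep ≠ [])
    (h : PySem.Chars.isIn sep s = false) : PySem.Chars.splitOn s sep = [s] := by
  rw [PySem.Chars.splitOn, pv_go_no_split sep (s.length + 1) s [] [] (by omega)]
  · simp
  · intro j hj
    exact (Bool.eq_false_iff.mp h)
      ((PySem.Chars.exists_prefix_drop_iff_isIn sep s).mp ⟨j, hj⟩)

theorem pv_isIn_false_of_not_infix (sep s : List Char) (h : ¬ sep <:+: s) :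
    PySem.Chars.isIn sep s = false := by
  rw [PySem.Chars.isIn_eq_false_iff]; exact h

-- leaf level: a part with no '&&' and no '||' is evaluated as A's leaf test, which is pvLeaf
theorem pv_parse_leaf (v d : List Char)
    (h1 : PySem.Chars.isIn ['&','&'] d = false)
    (h2 : PySem.Chars.isIn ['|','|'] d = false) :
    pvParseCondition v d = pvLeaf v d := by
  rw [pvParseCondition]
  simp only [h1, h2, Bool.false_eq_true, dite_false, if_false, pvLeaf]
  have : PySem.Chars.slice d (some 1) none = d.drop 1 := by simp [pysem]
  rw [this]

-- disjunct level: a conjunct with no '&&' is A's '||' disjunction of leaves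
theorem pv_parse_disj (v cj : List Char)
    (h1 : PySem.Chars.isIn ['&','&'] cj = false) :
    pvParseCondition v cj = (PySem.Chars.splitOn cj ['|','|']).any (fun d => pvLeaf v d) := by
  rw [pvParseCondition]
  simp only [h1, Bool.false_eq_true, dite_false]
  by_cases h2 : PySem.Chars.isIn ['|','|'] cj = true
  · rw [if_pos h2]
    rw [Bool.eq_iff_iff]
    simp only [List.any_eq_true, List.mem_attach, true_and]
    constructor
    · rintro ⟨⟨d, hd⟩, hpd⟩
      refine ⟨d, hd, ?_⟩
      rw [← pv_parse_leaf v d ?_ ?_]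
      · exact hpd
      · apply pv_isIn_false_of_not_infix
        intro hinf
        have hdinf := pv_mem_splitOn_infix cj ['|','|'] d hd
        exact (Bool.eq_false_iff.mp h1)
          ((PySem.Chars.isIn_iff_infix _ _).mpr (hinf.trans hdinf))
      · exact pv_isIn_false_of_not_infix _ _ (pv_mem_splitOn_not_sep cj ['|','|'] d (by simp) hd)
    · rintro ⟨d, hd, hpd⟩
      refine ⟨⟨d, hd⟩, ?_⟩
      rw [pv_parse_leaf v d ?_ ?_]
      · exact hpd
      · apply pv_isIn_false_of_not_infix
        intro hinf
        have hdinf := pv_mem_splitOn_infix cj ['|','|'] d hd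
        exact (Bool.eq_false_iff.mp h1)
          ((PySem.Chars.isIn_iff_infix _ _).mpr (hinf.trans hdinf))
      · exact pv_isIn_false_of_not_infix _ _ (pv_mem_splitOn_not_sep cj ['|','|'] d (by simp) hd)
  · have h2f : PySem.Chars.isIn ['|','|'] cj = false := Bool.eq_false_iff.mpr h2
    rw [pv_splitOn_of_not_isIn cj ['|','|'] (by simp) h2f]
    simp only [List.any_cons, List.any_nil, Bool.or_false]
    have := pv_parse_leaf v cj h1 h2f
    rw [pvParseCondition] at this
    simp only [h1, Bool.false_eq_true, dite_false] at this
    simpa [h2f] using this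

-- top level: A's recursion equals B's two-level all/any
theorem pv_parse_eq (v c : List Char) :
    pvParseCondition v c =
      (PySem.Chars.splitOn c ['&','&']).all
        (fun cj => (PySem.Chars.splitOn cj ['|','|']).any (fun d => pvLeaf v d)) := by
  by_cases h1 : PySem.Chars.isIn ['&','&'] c = true
  · rw [pvParseCondition]
    rw [dif_pos h1]
    rw [Bool.eq_iff_iff]
    simp only [List.all_eq_true, List.mem_attach]
    constructor
    · rintro hall cj hcj
      have := hall ⟨cj, hcj⟩ trivial
      rw [pv_parse_disj v cj
        (pv_isIn_false_of_not_infix _ _ (pv_mem_splitOn_not_sep c ['&','&'] cj (by simp) hcj))] at this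
      exact this
    · rintro hall ⟨cj, hcj⟩ -
      rw [pv_parse_disj v cj
        (pv_isIn_false_of_not_infix _ _ (pv_mem_splitOn_not_sep c ['&','&'] cj (by simp) hcj))]
      exact hall cj hcj
  · have h1f : PySem.Chars.isIn ['&','&'] c = false := Bool.eq_false_iff.mpr h1
    rw [pv_splitOn_of_not_isIn c ['&','&'] (by simp) h1f]
    simp only [List.all_cons, List.all_nil, Bool.and_true]
    exact pv_parse_disj v c h1f

-- ===== VERDICT =====
theorem evaluate_string_condition_py_spec : Claim_equal_evaluate_string_condition_py := by
  intro value condition _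
  unfold Spec_evaluate_string_condition_py evaluate_string_condition_py evaluate_string_condition_py_alt
  exact pv_parse_eq _ _
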